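-- pv_equiv track=rewrite | github.com/karteekpv77/English-Dutch-Language-Classifier | code/Decision.py | check_feature_one
-- ===== SOURCE A (Python) =====
-- def check_feature_one(words):
--     repeated_letters = ['aa', 'ee', 'ii', 'oo', 'uu']
--     for word in words:
--         word = word.lower()
--         for letter in repeated_letters:
--             if letter in word:
--                 return "True"
--     return "False"
-- ===== SOURCE B (Python) =====
-- VOWELS = "aeiou"
--
-- def check_feature_one(words):
--     for word in words:
--         w = word.lower()
--         if any(a == b and a in VOWELS for a, b in zip(w, w[1:])):
--             return "True"
--     return "False"
-- ===== Notes on version B (the rewrite author's own statement) =====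
-- stated objective: alternative
-- what changed: Replaces the five fixed-substring searches per word with a single adjacent-pair scan of the lowercased word testing equality plus vowel membership.
import Mathlib
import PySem

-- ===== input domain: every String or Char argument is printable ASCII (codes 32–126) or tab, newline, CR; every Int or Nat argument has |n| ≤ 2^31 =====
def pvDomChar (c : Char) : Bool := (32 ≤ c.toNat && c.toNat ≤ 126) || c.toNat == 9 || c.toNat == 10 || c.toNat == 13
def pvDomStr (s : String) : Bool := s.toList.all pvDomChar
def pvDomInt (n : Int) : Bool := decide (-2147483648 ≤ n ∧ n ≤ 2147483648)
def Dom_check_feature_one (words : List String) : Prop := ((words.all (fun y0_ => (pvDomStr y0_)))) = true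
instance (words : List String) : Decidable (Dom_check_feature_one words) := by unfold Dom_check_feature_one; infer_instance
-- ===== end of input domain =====

-- B replaces A's five fixed-substring searches per word by one adjacent-pair scan with a vowel test (alternative decomposition).

-- ===== PORT A =====
-- inner 'for letter in repeated_letters' loop: some "True" = early return
def innerA (letters : List String) (w : String) : Option String :=
  match letters with
  | [] => none
  | letter :: rest => if PySem.Str.isIn letter w then some "True" else innerA rest w

def check_feature_one (words : List String) : String :=
  match words with
  | [] => "False"
  | word :: rest =>
    let w := PySem.Str.lower word
    match innerA ["aa", "ee", "ii", "oo", "uu"] w with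
    | some r => r
    | none => check_feature_one rest

-- ===== PORT B =====
def hasDoubleVowel (w : List Char) : Bool :=
  (w.zip w.tail).any (fun p =>
    p.1 == p.2 && (p.1 == 'a' || p.1 == 'e' || p.1 == 'i' || p.1 == 'o' || p.1 == 'u'))

def check_feature_one_alt (words : List String) : String :=
  match words with
  | [] => "False"
  | word :: rest =>
    if hasDoubleVowel (PySem.Chars.lower word.toList) then "True"
    else check_feature_one_alt rest

-- ===== PRECONDITION & SPEC =====
def Spec_check_feature_one (words : List String) (out : String) : Prop := out = check_feature_one_alt words
instance (words : List String) (out : String) : Decidable (Spec_check_feature_one words out) := by unfold Spec_check_feature_one; infer_instance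

-- ===== CLAIM (what is proved, stated in full; the proofs are below) =====
def Claim_equal_check_feature_one : Prop := ∀ (words : List String), Dom_check_feature_one words → Spec_check_feature_one words (check_feature_one words)

-- ===== LEMMAS AND PROOFS =====
lemma doub (c : Char) : ∀ l : List Char,
    PySem.Chars.isIn [c, c] l = (l.zip l.tail).any (fun p => p.1 == c && p.2 == c)
  | [] => by
    rw [Bool.eq_iff_iff]
    simp [PySem.Chars.isIn_iff_infix]
  | [a] => by
    rw [Bool.eq_iff_iff]
    simp [PySem.Chars.isIn_iff_infix, List.infix_cons_iff, List.cons_prefix_cons]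
  | a :: b :: t => by
    have ih := doub c (b :: t)
    rw [Bool.eq_iff_iff] at ih ⊢
    simp only [PySem.Chars.isIn_iff_infix, List.infix_cons_iff, List.cons_prefix_cons,
      List.nil_prefix, and_true, List.tail_cons, List.zip_cons_cons, List.any_cons,
      Bool.or_eq_true, Bool.and_eq_true, beq_iff_eq] at ih ⊢
    constructor
    · rintro (⟨h1, h2⟩ | h)
      · exact Or.inl ⟨h1.symm, h2.symm⟩
      · exact Or.inr (ih.mp h)
    · rintro (⟨h1, h2⟩ | h)
      · exact Or.inl ⟨h1.symm, h2.symm⟩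
      · exact Or.inr (ih.mpr h)

lemma core (l : List Char) :
    (PySem.Chars.isIn ['a','a'] l || PySem.Chars.isIn ['e','e'] l || PySem.Chars.isIn ['i','i'] l
      || PySem.Chars.isIn ['o','o'] l || PySem.Chars.isIn ['u','u'] l) = hasDoubleVowel l := by
  rw [Bool.eq_iff_iff]
  simp only [hasDoubleVowel, doub, Bool.or_eq_true, List.any_eq_true,
    Bool.and_eq_true, beq_iff_eq]
  constructor
  · rintro ((((⟨p, hp, h1, h2⟩ | ⟨p, hp, h1, h2⟩) | ⟨p, hp, h1, h2⟩) | ⟨p, hp, h1, h2⟩) | ⟨p, hp, h1, h2⟩) <;>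
      exact ⟨p, hp, by rw [h1, h2], by tauto⟩
  · rintro ⟨p, hp, h12, (((h | h) | h) | h) | h⟩
    · exact Or.inl (Or.inl (Or.inl (Or.inl ⟨p, hp, h, by rw [← h12, h]⟩)))
    · exact Or.inl (Or.inl (Or.inl (Or.inr ⟨p, hp, h, by rw [← h12, h]⟩)))
    · exact Or.inl (Or.inl (Or.inr ⟨p, hp, h, by rw [← h12, h]⟩))
    · exact Or.inl (Or.inr ⟨p, hp, h, by rw [← h12, h]⟩)
    · exact Or.inr ⟨p, hp, h, by rw [← h12, h]⟩

lemma str_isIn_eq (sub w : String) :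
    PySem.Str.isIn sub w = PySem.Chars.isIn sub.toList w.toList := by
  rw [Bool.eq_iff_iff, PySem.Str.isIn_iff_infix, PySem.Chars.isIn_iff_infix]

lemma inner_eq (w : String) :
    innerA ["aa", "ee", "ii", "oo", "uu"] w
      = (if hasDoubleVowel w.toList then some "True" else none) := by
  have hcore := core w.toList
  simp only [innerA, str_isIn_eq]
  rw [← hcore]
  by_cases h1 : PySem.Chars.isIn "aa".toList w.toList <;>
  by_cases h2 : PySem.Chars.isIn "ee".toList w.toList <;>
  by_cases h3 : PySem.Chars.isIn "ii".toList w.toList <;>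
  by_cases h4 : PySem.Chars.isIn "oo".toList w.toList <;>
  by_cases h5 : PySem.Chars.isIn "uu".toList w.toList <;>
  simp_all

lemma main_eq (words : List String) : check_feature_one words = check_feature_one_alt words := by
  induction words with
  | nil => rfl
  | cons word rest ih =>
    simp only [check_feature_one, check_feature_one_alt, inner_eq]
    rw [show (PySem.Str.lower word).toList = PySem.Chars.lower word.toList from
      PySem.Str.toList_lower word]
    split_ifs <;> simp [ih]

-- ===== VERDICT (by name: the statement is the Claim_ definition above) =====
theorem check_feature_one_spec : Claim_equal_check_feature_one := by
  intro words _
  exact main_eq words
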